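-- pv_equiv track=rewrite | github.com/Jlucas932/etp-atualizado | src/main/python/domain/usecase/etp/etp_generator_dynamic.py | _post_process_section_content
-- ===== SOURCE A (Python) =====
-- from typing import Dict, List, Optional
--
-- def _post_process_section_content(content: str, section_info: Dict) -> str:
--     """Pós-processa o conteúdo da seção"""
--     # Garantir que o título esteja em maiúsculas
--     lines = content.split('\n')
--     if lines and lines[0].strip():
--         title = section_info['section']
--         if not lines[0].strip().upper().startswith(title.split('.')[0]):
--             lines[0] = title
--
--     # Remover linhas vazias excessivas
--     processed_lines = []
--     empty_count = 0
--
--     for line in lines: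
--         if line.strip():
--             processed_lines.append(line)
--             empty_count = 0
--         else:
--             empty_count += 1
--             if empty_count <= 1:  # Permitir no máximo uma linha vazia consecutiva
--                 processed_lines.append(line)
--
--     return '\n'.join(processed_lines)
-- ===== SOURCE B (Python) =====
-- def _post_process_section_content(content: str, section_info) -> str:
--     """Normalize the title, then keep each line based on a stateless pairwise test:
--     a line survives iff it is non-blank or its predecessor is non-blank
--     (the first line always survives)."""
--     lines = content.split('\n')
--     if lines and lines[0].strip():
--         title = section_info['section']
--         if not lines[0].strip().upper().startswith(title.split('.')[0]):
--             lines[0] = title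
--
--     kept = lines[:1] + [cur for prev, cur in zip(lines, lines[1:])
--                         if cur.strip() or prev.strip()]
--     return '\n'.join(kept)
-- ===== Notes on version B (the rewrite author's own statement) =====
-- stated objective: idiomatic
-- what changed: A's empty_count state-machine loop is replaced by a stateless pairwise filter: zip the line list with itself shifted by one and keep a line iff it or its predecessor is non-blank, so no mutable run counter exists.
import Mathlib
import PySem

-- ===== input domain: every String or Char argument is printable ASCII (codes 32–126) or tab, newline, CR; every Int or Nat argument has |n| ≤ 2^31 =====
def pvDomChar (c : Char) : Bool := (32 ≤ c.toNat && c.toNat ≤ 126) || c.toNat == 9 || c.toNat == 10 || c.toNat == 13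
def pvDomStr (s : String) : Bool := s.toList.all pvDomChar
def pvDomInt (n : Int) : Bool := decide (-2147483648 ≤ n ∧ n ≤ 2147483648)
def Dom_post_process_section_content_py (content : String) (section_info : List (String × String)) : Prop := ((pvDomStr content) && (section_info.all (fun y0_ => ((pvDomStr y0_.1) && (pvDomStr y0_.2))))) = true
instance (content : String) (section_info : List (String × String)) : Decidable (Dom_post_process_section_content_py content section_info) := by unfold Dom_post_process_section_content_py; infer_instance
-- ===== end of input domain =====

-- B replaces A's empty_count state-machine loop by a stateless pairwise filter over the list
-- zipped with its one-shifted self (objective: idiomatic decomposition; no speed claim).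

-- ===== PORT A =====

-- title normalization step, identical in both Pythons
-- (section_info['section'] would raise KeyError when the key is absent; Pre_ excludes that, getD "" is the total stand-in)
def pvTitleFix (lines : List String) (section_info : List (String × String)) : List String :=
  match lines with
  | [] => []
  | l0 :: rest =>
    if PySem.Str.strip l0 ≠ "" then
      let title := PySem.Dict.getD (PySem.Dict.mk section_info) "section" ""
      if ¬ (PySem.Str.startswith (PySem.Str.upper (PySem.Str.strip l0))
            (((PySem.Str.split? title ".").getD []).headD "")) then
        title :: rest
      else l0 :: rest
    else l0 :: rest

-- A's loop: processed_lines / empty_count state machine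
def pvALoop : List String → List String → Int → List String
  | [], acc, _ => acc
  | l :: ls, acc, ec =>
    if PySem.Str.strip l ≠ "" then
      pvALoop ls (acc ++ [l]) 0
    else
      if ec + 1 ≤ 1 then pvALoop ls (acc ++ [l]) (ec + 1)
      else pvALoop ls acc (ec + 1)

def post_process_section_content_py (content : String) (section_info : List (String × String)) : String :=
  let lines := (PySem.Str.split? content "\n").getD []
  let lines := pvTitleFix lines section_info
  PySem.Str.join "\n" (pvALoop lines [] 0)

-- ===== PORT B =====

-- B: lines[:1] + [cur for prev, cur in zip(lines, lines[1:]) if cur.strip() or prev.strip()]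
def post_process_section_content_py_alt (content : String) (section_info : List (String × String)) : String :=
  let lines := (PySem.Str.split? content "\n").getD []
  let lines := pvTitleFix lines section_info
  let kept := lines.take 1 ++
    (((lines.zip (lines.drop 1)).filter
        (fun pc => !(PySem.Str.strip pc.2 == "") || !(PySem.Str.strip pc.1 == ""))).map Prod.snd)
  PySem.Str.join "\n" kept

-- ===== PRECONDITION & SPEC =====
-- Pre_ excludes exactly the inputs where both Pythons raise KeyError: a non-blank first line with no 'section' key.
def Pre_post_process_section_content_py (content : String) (section_info : List (String × String)) : Prop :=
  PySem.Str.strip ((((PySem.Str.split? content "\n").getD []).headD "")) = "" ∨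
  (section_info.map Prod.fst).contains "section" = true
instance (content : String) (section_info : List (String × String)) : Decidable (Pre_post_process_section_content_py content section_info) := by unfold Pre_post_process_section_content_py; infer_instance

def pvWitness_post_process_section_content_py : String × (List (String × String)) :=
  ("1. INTRO\n\n\n\nbody text", [("section", "1. INTRODUCAO")])

def Spec_post_process_section_content_py (content : String) (section_info : List (String × String)) (out : String) : Prop := out = post_process_section_content_py_alt content section_info
instance (content : String) (section_info : List (String × String)) (out : String) : Decidable (Spec_post_process_section_content_py content section_info out) := by unfold Spec_post_process_section_content_py; infer_instance

-- ===== CLAIM (what is proved, stated in full; the proofs are below) =====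
def Claim_equal_post_process_section_content_py : Prop := ∀ (content : String) (section_info : List (String × String)), Dom_post_process_section_content_py content section_info → Pre_post_process_section_content_py content section_info → Spec_post_process_section_content_py content section_info (post_process_section_content_py content section_info)

-- ===== LEMMAS AND PROOFS =====

def pvBlank (l : String) : Bool := PySem.Str.strip l == ""

-- reference recursion both programs are reduced to: carry "previous line was blank"
def pvSpecLines : List String → Bool → List String
  | [], _ => []
  | l :: ls, pb =>
    if pvBlank l then (if pb then pvSpecLines ls true else l :: pvSpecLines ls true)
    else l :: pvSpecLines ls false

theorem pvALoop_eq_spec (ls : List String) (acc : List String) (ec : Int) (h : 0 ≤ ec) :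
    pvALoop ls acc ec = acc ++ pvSpecLines ls (decide (1 ≤ ec)) := by
  induction ls generalizing acc ec with
  | nil => simp [pvALoop, pvSpecLines]
  | cons l ls ih =>
    by_cases hb : pvBlank l
    · have hb' : ¬ (PySem.Str.strip l ≠ "") := by
        simpa [pvBlank] using hb
      by_cases h1 : (1 : Int) ≤ ec
      · have : ¬ (ec + 1 ≤ 1) := by omega
        simp [pvALoop, hb', this, pvSpecLines, hb, h1,
          ih acc (ec + 1) (by omega), show (1:Int) ≤ ec + 1 by omega]
      · have : ec + 1 ≤ 1 := by omega
        simp [pvALoop, hb', this, pvSpecLines, hb, h1,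
          ih (acc ++ [l]) (ec + 1) (by omega), show (1:Int) ≤ ec + 1 by omega]
    · have hb' : (PySem.Str.strip l ≠ "") := by
        simpa [pvBlank] using hb
      simp [pvALoop, hb', pvSpecLines, hb, ih (acc ++ [l]) 0 (by omega)]

-- the pairwise filter, related to the reference recursion by carrying the predecessor
theorem pvPairs_eq_spec (ls : List String) (prev : String) :
    (((prev :: ls).zip ls).filter
        (fun pc => !(PySem.Str.strip pc.2 == "") || !(PySem.Str.strip pc.1 == ""))).map Prod.snd
      = pvSpecLines ls (pvBlank prev) := by
  induction ls generalizing prev with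
  | nil => simp [pvSpecLines]
  | cons l ls ih =>
    have hz : (prev :: l :: ls).zip (l :: ls) = (prev, l) :: ((l :: ls).zip ls) := rfl
    rw [hz]
    by_cases hl : pvBlank l
    · by_cases hp : pvBlank prev
      · simp [pvBlank] at hl hp
        simp [List.filter, pvSpecLines, ih l,
          show (PySem.Str.strip l == "") = true from by simp [hl],
          show (PySem.Str.strip prev == "") = true from by simp [hp],
          show pvBlank l = true from by simp [pvBlank, hl],
          show pvBlank prev = true from by simp [pvBlank, hp]]
      · simp [pvBlank] at hl hp
        simp [List.filter, pvSpecLines, ih l,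
          show (PySem.Str.strip l == "") = true from by simp [hl],
          show (PySem.Str.strip prev == "") = false from by simp [hp],
          show pvBlank l = true from by simp [pvBlank, hl],
          show pvBlank prev = false from by simp [pvBlank, hp]]
    · simp [pvBlank] at hl
      simp [List.filter, pvSpecLines, ih l,
        show (PySem.Str.strip l == "") = false from by simp [hl],
        show pvBlank l = false from by simp [pvBlank, hl]]

theorem pvBOut_eq_spec (ls : List String) :
    ls.take 1 ++
      (((ls.zip (ls.drop 1)).filter
          (fun pc => !(PySem.Str.strip pc.2 == "") || !(PySem.Str.strip pc.1 == ""))).map Prod.snd)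
      = pvSpecLines ls false := by
  cases ls with
  | nil => simp [pvSpecLines]
  | cons l tl =>
    have hz : (l :: tl).drop 1 = tl := rfl
    rw [hz, pvPairs_eq_spec tl l]
    by_cases hl : pvBlank l
    · simp [pvSpecLines, hl]
    · simp [pvSpecLines, hl]

-- ===== VERDICT (by name: the statement is the Claim_ definition above) =====
theorem post_process_section_content_py_spec : Claim_equal_post_process_section_content_py := by
  intro content section_info _ _
  unfold Spec_post_process_section_content_py
  simp only [post_process_section_content_py, post_process_section_content_py_alt]
  rw [pvALoop_eq_spec _ _ 0 (by omega), pvBOut_eq_spec]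
  simp
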